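-- pv_equiv track=rewrite | github.com/Shweta2013/InfyTQ-Exercises-And-Assignments | PROGRAMMING FUNDAMENTALS USING PYTHON/Day 4/#PF-Assignment-32.py | max_visited_speciality
-- ===== SOURCE A (Python) =====
-- def max_visited_speciality(patient_medical_speciality_list,medical_speciality):
--     list1={}
--     p,e,o=0,0,0
--     for i in range(1,len(patient_medical_speciality_list),2):
--         if (patient_medical_speciality_list[i]=="P"):
--             p+=1
--         elif(patient_medical_speciality_list[i]=="O"):
--             o+=1
--         elif(patient_medical_speciality_list[i]=="E"):
--             e+=1
--     list1["P"]=p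
--     list1["O"]=o
--     list1["E"]=e
--     m=max(list1.values())
--     for key in list1:
--         if list1[key]==m:
--             k1=key
--
--     speciality=medical_speciality[k1]
--     return speciality
-- ===== SOURCE B (Python) =====
-- def max_visited_speciality(patient_medical_speciality_list, medical_speciality):
--     def tally(rest):
--         if len(rest) < 2:
--             return {"P": 0, "O": 0, "E": 0}
--         counts = tally(rest[2:])
--         if rest[1] in counts:
--             counts[rest[1]] += 1
--         return counts
--     counts = tally(patient_medical_speciality_list)
--     _, i = max((counts[k], i) for i, k in enumerate(("P", "O", "E")))
--     return medical_speciality[("P", "O", "E")[i]]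
-- ===== Notes on version B (the rewrite author's own statement) =====
-- stated objective: alternative
-- what changed: B tallies the codes by structural recursion that consumes the list two elements at a time building a dict bottom-up (instead of A's iterative index loop over range(1,len,2) with three manual accumulators), and selects the winner as max over (count, position) pairs (lexicographic tuple max, last key wins ties) instead of A's separate max-of-values plus a dict scan keeping the last matching key.
import Mathlib
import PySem

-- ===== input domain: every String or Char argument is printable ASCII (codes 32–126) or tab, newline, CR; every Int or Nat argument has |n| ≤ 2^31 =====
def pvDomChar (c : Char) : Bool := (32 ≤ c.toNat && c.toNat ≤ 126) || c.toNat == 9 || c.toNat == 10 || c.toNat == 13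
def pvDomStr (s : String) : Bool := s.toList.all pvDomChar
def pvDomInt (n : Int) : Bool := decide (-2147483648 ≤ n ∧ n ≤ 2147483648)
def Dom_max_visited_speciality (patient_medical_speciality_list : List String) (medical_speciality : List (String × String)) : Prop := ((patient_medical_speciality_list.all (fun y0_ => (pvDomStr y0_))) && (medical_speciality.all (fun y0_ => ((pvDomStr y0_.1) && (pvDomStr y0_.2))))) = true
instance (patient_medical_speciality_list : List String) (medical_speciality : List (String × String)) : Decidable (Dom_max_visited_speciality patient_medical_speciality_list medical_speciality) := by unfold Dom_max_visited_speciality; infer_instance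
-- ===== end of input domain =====

-- B replaces A's iterative index loop and dict-scan tie-break by a structural recursion that
-- consumes the list two elements at a time and a lexicographic max over (count, position) pairs
-- (alternative decomposition, same cost).

-- ===== PORT A =====
def max_visited_speciality (patient_medical_speciality_list : List String) (medical_speciality : List (String × String)) : String :=
  -- p, e, o = 0, 0, 0; for i in range(1, len(...), 2): branch on the entry and bump a counter
  let peo : Int × Int × Int :=
    (PySem.List.pyRange 1 (patient_medical_speciality_list.length : Int) 2).foldl
      (fun (peo : Int × Int × Int) i =>
        if PySem.List.pyGetD patient_medical_speciality_list i "" = "P" then (peo.1 + 1, peo.2.1, peo.2.2)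
        else if PySem.List.pyGetD patient_medical_speciality_list i "" = "O" then (peo.1, peo.2.1, peo.2.2 + 1)
        else if PySem.List.pyGetD patient_medical_speciality_list i "" = "E" then (peo.1, peo.2.1 + 1, peo.2.2)
        else peo)
      (0, 0, 0)
  -- list1["P"] = p; list1["O"] = o; list1["E"] = e
  let list1 : PySem.Dict String Int :=
    (((PySem.Dict.empty).insert "P" peo.1).insert "O" peo.2.2).insert "E" peo.2.1
  -- m = max(list1.values())
  let m : Int := (PySem.List.max? list1.values id).getD 0
  -- for key in list1: if list1[key] == m: k1 = key
  let k1 : String :=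
    (list1.keys.foldl
      (fun (acc : Option String) key => if list1.getD key 0 = m then some key else acc)
      none).getD ""
  -- speciality = medical_speciality[k1]  (KeyError excluded by Pre_)
  (medical_speciality.lookup k1).getD ""

-- ===== PORT B =====
-- def tally(rest): if len(rest) < 2: return {"P":0,"O":0,"E":0}
--                  counts = tally(rest[2:]); if rest[1] in counts: counts[rest[1]] += 1; return counts
def pvTallyB : List String → PySem.Dict String Int
  | _ :: b :: rest =>
      let counts := pvTallyB rest
      if counts.contains b then counts.modify b 0 (· + 1) else counts
  | _ => PySem.Dict.mk [("P", 0), ("O", 0), ("E", 0)]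

def max_visited_speciality_alt (patient_medical_speciality_list : List String) (medical_speciality : List (String × String)) : String :=
  let counts : PySem.Dict String Int := pvTallyB patient_medical_speciality_list
  -- _, i = max((counts[k], i) for i, k in enumerate(("P", "O", "E")))
  let pairs : List (Int × Int) :=
    (PySem.List.enumerate ["P", "O", "E"]).map (fun p => ((counts.get? p.2).getD 0, p.1))
  let best : Int × Int :=
    match pairs with
    | t :: rest => rest.foldl (fun b t => if b.1 < t.1 ∨ (b.1 = t.1 ∧ b.2 < t.2) then t else b) t
    | [] => (0, 0)
  -- return medical_speciality[("P", "O", "E")[i]]  (KeyError excluded by Pre_)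
  let k1 : String := (PySem.List.pyGet? ["P", "O", "E"] best.2).getD ""
  (medical_speciality.lookup k1).getD ""

-- ===== PRECONDITION & SPEC =====
-- closed-form description of the odd-index entries and of the winning key
-- (the last of P, O, E whose count among the odd-index entries is maximal)
def pvOddVals (xs : List String) : List String :=
  (List.range (xs.length / 2)).map (fun k => xs.getD (2 * k + 1) "")
def pvWinner (xs : List String) : String :=
  let cp := ((pvOddVals xs).count "P" : Int)
  let co := ((pvOddVals xs).count "O" : Int)
  let ce := ((pvOddVals xs).count "E" : Int)
  if ce ≥ cp ∧ ce ≥ co then "E" else if co ≥ cp then "O" else "P"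
-- Pre_ excludes exactly the inputs on which Python A raises KeyError: the winning key missing from the dict.
def Pre_max_visited_speciality (patient_medical_speciality_list : List String) (medical_speciality : List (String × String)) : Prop :=
  (medical_speciality.lookup (pvWinner patient_medical_speciality_list)).isSome = true
instance (patient_medical_speciality_list : List String) (medical_speciality : List (String × String)) : Decidable (Pre_max_visited_speciality patient_medical_speciality_list medical_speciality) := by unfold Pre_max_visited_speciality; infer_instance
def pvWitness_max_visited_speciality : List String × (List (String × String)) :=
  (["a", "P", "b", "O", "c", "O"], [("P", "Pediatrics"), ("O", "Orthopedics"), ("E", "ENT")])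
def Spec_max_visited_speciality (patient_medical_speciality_list : List String) (medical_speciality : List (String × String)) (out : String) : Prop := out = max_visited_speciality_alt patient_medical_speciality_list medical_speciality
instance (patient_medical_speciality_list : List String) (medical_speciality : List (String × String)) (out : String) : Decidable (Spec_max_visited_speciality patient_medical_speciality_list medical_speciality out) := by unfold Spec_max_visited_speciality; infer_instance

-- ===== CLAIM (what is proved, stated in full; the proofs are below) =====
def Claim_equal_max_visited_speciality : Prop := ∀ (patient_medical_speciality_list : List String) (medical_speciality : List (String × String)), Dom_max_visited_speciality patient_medical_speciality_list medical_speciality → Pre_max_visited_speciality patient_medical_speciality_list medical_speciality → Spec_max_visited_speciality patient_medical_speciality_list medical_speciality (max_visited_speciality patient_medical_speciality_list medical_speciality)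

-- ===== LEMMAS AND PROOFS =====

-- the tie rule shared by both ports, as a function of the three counts
def pvKey (cp co ce : Int) : String :=
  if ce ≥ cp ∧ ce ≥ co then "E" else if co ≥ cp then "O" else "P"

-- A's loop body, as a step function over the visited value
def pvStep (peo : Int × Int × Int) (x : String) : Int × Int × Int :=
  if x = "P" then (peo.1 + 1, peo.2.1, peo.2.2)
  else if x = "O" then (peo.1, peo.2.1, peo.2.2 + 1)
  else if x = "E" then (peo.1, peo.2.1 + 1, peo.2.2)
  else peo

lemma pvStep_counts (L : List String) (p e o : Int) :
    L.foldl pvStep (p, e, o) = (p + L.count "P", e + L.count "E", o + L.count "O") := by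
  induction L generalizing p e o with
  | nil => simp
  | cons x t ih =>
      simp only [List.foldl_cons, List.count_cons, pvStep]
      by_cases hP : x = "P"
      · simp [hP, ih]; ring
      · by_cases hO : x = "O"
        · simp [hO, ih]; ring
        · by_cases hE : x = "E"
          · simp [hE, ih]; ring
          · simp [hP, hO, hE, ih]

-- the indices range(1, len, 2) reads off exactly the odd-index entries
lemma pvRange_map_oddVals (xs : List String) :
    (PySem.List.pyRange 1 (xs.length : Int) 2).map (fun i => PySem.List.pyGetD xs i "") = pvOddVals xs := by
  rw [PySem.List.pyRange_of_pos 1 (xs.length : Int) (by norm_num)]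
  have hc : (if (1:Int) < (xs.length : Int) then (((xs.length:Int) - 1 + 2 - 1) / 2).toNat else 0) = xs.length / 2 := by
    split <;> omega
  rw [hc]
  unfold pvOddVals
  rw [List.map_map]
  apply List.map_congr_left
  intro k _
  simp only [Function.comp]
  have : (1 : Int) + 2 * (k : Int) = ((2 * k + 1 : Nat) : Int) := by push_cast; ring
  rw [this, PySem.List.pyGetD_natCast]

lemma pvMax3 (p o e : Int) : (PySem.List.max? [p, o, e] id).getD 0 = max (max p o) e := by
  simp only [PySem.List.max?, List.foldl, id]
  split_ifs <;> simp_all <;> split_ifs <;> simp_all <;> omega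

-- A's back end (dict literal, max of values, keep-the-last key scan) computes the tie rule
lemma pvSelA (p o e : Int) :
    (let list1 : PySem.Dict String Int := (((PySem.Dict.empty).insert "P" p).insert "O" o).insert "E" e
     let m : Int := (PySem.List.max? list1.values id).getD 0
     (list1.keys.foldl (fun (acc : Option String) key => if list1.getD key 0 = m then some key else acc) none).getD "")
    = pvKey p o e := by
  have hv : ((((PySem.Dict.empty).insert "P" p).insert "O" o).insert "E" e : PySem.Dict String Int).values = [p, o, e] := rfl
  have hk : ((((PySem.Dict.empty).insert "P" p).insert "O" o).insert "E" e : PySem.Dict String Int).keys = ["P", "O", "E"] := rfl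
  have hP : ((((PySem.Dict.empty).insert "P" p).insert "O" o).insert "E" e : PySem.Dict String Int).getD "P" 0 = p := rfl
  have hO : ((((PySem.Dict.empty).insert "P" p).insert "O" o).insert "E" e : PySem.Dict String Int).getD "O" 0 = o := rfl
  have hE : ((((PySem.Dict.empty).insert "P" p).insert "O" o).insert "E" e : PySem.Dict String Int).getD "E" 0 = e := rfl
  simp only [hv, hk, pvMax3, List.foldl, hP, hO, hE, pvKey]
  split_ifs <;> simp only [Option.getD_some, Option.getD_none] <;> first | rfl | (exfalso; omega)

lemma pvA_eq (xs : List String) (ms : List (String × String)) :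
    max_visited_speciality xs ms = (ms.lookup (pvWinner xs)).getD "" := by
  unfold max_visited_speciality
  have hfold :
      (PySem.List.pyRange 1 (xs.length : Int) 2).foldl
        (fun (peo : Int × Int × Int) i =>
          if PySem.List.pyGetD xs i "" = "P" then (peo.1 + 1, peo.2.1, peo.2.2)
          else if PySem.List.pyGetD xs i "" = "O" then (peo.1, peo.2.1, peo.2.2 + 1)
          else if PySem.List.pyGetD xs i "" = "E" then (peo.1, peo.2.1 + 1, peo.2.2)
          else peo)
        (0, 0, 0)
      = ((((pvOddVals xs).count "P" : Int), ((pvOddVals xs).count "E" : Int), ((pvOddVals xs).count "O" : Int)) : Int × Int × Int) := by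
    have h2 :
        (PySem.List.pyRange 1 (xs.length : Int) 2).foldl
          (fun (peo : Int × Int × Int) i => pvStep peo (PySem.List.pyGetD xs i ""))
          (0, 0, 0) = ((pvOddVals xs).map id).foldl pvStep (0, 0, 0) := by
      rw [← List.foldl_map, pvRange_map_oddVals]; simp
    simpa [pvStep, pvStep_counts] using h2
  rw [hfold]
  have := pvSelA ((pvOddVals xs).count "P" : Int) ((pvOddVals xs).count "O" : Int) ((pvOddVals xs).count "E" : Int)
  simp only at this ⊢
  rw [this]
  rfl

-- B side: structural characterisation of pvOddVals on the two-at-a-time recursion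
lemma pvOddVals_nil : pvOddVals [] = [] := rfl
lemma pvOddVals_single (a : String) : pvOddVals [a] = [] := by simp [pvOddVals]
lemma pvOddVals_cons2 (a b : String) (t : List String) :
    pvOddVals (a :: b :: t) = b :: pvOddVals t := by
  unfold pvOddVals
  have hl : (a :: b :: t).length / 2 = t.length / 2 + 1 := by simp; omega
  rw [hl, List.range_succ_eq_map]
  simp [List.map_map, Function.comp]
  intro k hk
  have h2 : 2 * (k + 1) = (2 * k + 1) + 1 := by ring
  simp [h2]

-- B's recursive tally builds exactly the literal dict of the three counts over the odd entries
theorem pvTallyB_eq : ∀ (xs : List String),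
    pvTallyB xs = PySem.Dict.mk
      [("P", ((pvOddVals xs).count "P" : Int)),
       ("O", ((pvOddVals xs).count "O" : Int)),
       ("E", ((pvOddVals xs).count "E" : Int))]
  | [] => by simp [pvTallyB, pvOddVals_nil]
  | [a] => by simp [pvTallyB, pvOddVals_single]
  | a :: b :: t => by
      have ih := pvTallyB_eq t
      show (let counts := pvTallyB t;
            if counts.contains b then counts.modify b 0 (· + 1) else counts) = _
      rw [pvOddVals_cons2]
      simp only [ih]
      by_cases hP : b = "P"
      · subst hP
        have hc : (PySem.Dict.mk
            [("P", ((pvOddVals t).count "P" : Int)), ("O", ((pvOddVals t).count "O" : Int)),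
             ("E", ((pvOddVals t).count "E" : Int))]).contains "P" = true := rfl
        have hm : ∀ p o e : Int, (PySem.Dict.mk [("P", p), ("O", o), ("E", e)]).modify "P" 0 (· + 1)
            = PySem.Dict.mk [("P", p + 1), ("O", o), ("E", e)] := fun _ _ _ => rfl
        simp only [hc, if_true, hm]
        congr 1
        simp [List.count_cons]
      · by_cases hO : b = "O"
        · subst hO
          have hc : (PySem.Dict.mk
              [("P", ((pvOddVals t).count "P" : Int)), ("O", ((pvOddVals t).count "O" : Int)),
               ("E", ((pvOddVals t).count "E" : Int))]).contains "O" = true := rfl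
          have hm : ∀ p o e : Int, (PySem.Dict.mk [("P", p), ("O", o), ("E", e)]).modify "O" 0 (· + 1)
              = PySem.Dict.mk [("P", p), ("O", o + 1), ("E", e)] := fun _ _ _ => rfl
          simp only [hc, if_true, hm]
          congr 1
          simp [List.count_cons, hP]
        · by_cases hE : b = "E"
          · subst hE
            have hc : (PySem.Dict.mk
                [("P", ((pvOddVals t).count "P" : Int)), ("O", ((pvOddVals t).count "O" : Int)),
                 ("E", ((pvOddVals t).count "E" : Int))]).contains "E" = true := rfl
            have hm : ∀ p o e : Int, (PySem.Dict.mk [("P", p), ("O", o), ("E", e)]).modify "E" 0 (· + 1)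
                = PySem.Dict.mk [("P", p), ("O", o), ("E", e + 1)] := fun _ _ _ => rfl
            simp only [hc, if_true, hm]
            congr 1
            simp [List.count_cons, hP, hO]
          · have hc : (PySem.Dict.mk
                [("P", ((pvOddVals t).count "P" : Int)), ("O", ((pvOddVals t).count "O" : Int)),
                 ("E", ((pvOddVals t).count "E" : Int))]).contains b = false := by
              simp only [PySem.Dict.contains_mk]
              simp
              exact ⟨fun h => hP h.symm, fun h => hO h.symm, fun h => hE h.symm⟩
            simp only [hc, if_neg, Bool.false_eq_true, not_false_iff]
            congr 1
            simp [List.count_cons]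
            exact ⟨hP, hO, hE⟩

-- B's back end (lexicographic max over (count, position), index into the key tuple) computes the tie rule
lemma pvSelB (cp co ce : Int) :
    (let pairs : List (Int × Int) :=
       (PySem.List.enumerate ["P", "O", "E"]).map
         (fun p => (((PySem.Dict.mk [("P", cp), ("O", co), ("E", ce)]).get? p.2).getD 0, p.1))
     let best : Int × Int :=
       match pairs with
       | t :: rest => rest.foldl (fun b t => if b.1 < t.1 ∨ (b.1 = t.1 ∧ b.2 < t.2) then t else b) t
       | [] => (0, 0)
     (PySem.List.pyGet? ["P", "O", "E"] best.2).getD "")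
    = pvKey cp co ce := by
  have hp : (PySem.List.enumerate ["P", "O", "E"]).map
      (fun p => (((PySem.Dict.mk [("P", cp), ("O", co), ("E", ce)]).get? p.2).getD 0, p.1))
      = [(cp, 0), (co, 1), (ce, 2)] := rfl
  simp only [hp, List.foldl, pvKey]
  split_ifs <;> first | rfl | (exfalso; omega)

lemma pvB_eq (xs : List String) (ms : List (String × String)) :
    max_visited_speciality_alt xs ms = (ms.lookup (pvWinner xs)).getD "" := by
  unfold max_visited_speciality_alt
  rw [pvTallyB_eq]
  have := pvSelB ((pvOddVals xs).count "P" : Int) ((pvOddVals xs).count "O" : Int) ((pvOddVals xs).count "E" : Int)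
  simp only at this ⊢
  rw [this]
  rfl

-- ===== VERDICT (by name: the statement is the Claim_ definition above) =====
theorem max_visited_speciality_spec : Claim_equal_max_visited_speciality := by
  intro xs ms _ _
  unfold Spec_max_visited_speciality
  rw [pvA_eq, pvB_eq]
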